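-- pv_equiv track=rewrite | github.com/Luis-Fernando-2025/bot-academico | whatsapp_webhook_backup.py | normalizar_avisos
-- ===== SOURCE A (Python) =====
-- MIN_DIA = 5
--
-- MAX_DIA = 30
--
-- MAX_AVISOS = 4
--
-- AVISOS_DEFAULT = [30, 20, 10, 5]
--
-- def normalizar_avisos(avisos):
--     if not avisos:
--         return AVISOS_DEFAULT
--     try:
--         avisos = [int(x) for x in avisos]
--     except ValueError:
--         return AVISOS_DEFAULT
--     filtrados = sorted({d for d in avisos if MIN_DIA <= d <= MAX_DIA}, reverse=True)
--     return filtrados[:MAX_AVISOS] if filtrados else AVISOS_DEFAULT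
-- ===== SOURCE B (Python) =====
-- MIN_DIA = 5
--
-- MAX_DIA = 30
--
-- MAX_AVISOS = 4
--
-- AVISOS_DEFAULT = [30, 20, 10, 5]
--
-- def normalizar_avisos(avisos):
--     if not avisos:
--         return AVISOS_DEFAULT
--     try:
--         vals = {int(x) for x in avisos}
--     except ValueError:
--         return AVISOS_DEFAULT
--     res = []
--     for d in range(MAX_DIA, MIN_DIA - 1, -1):
--         if len(res) == MAX_AVISOS:
--             break
--         if d in vals:
--             res.append(d)
--     return res if res else AVISOS_DEFAULT
-- ===== Notes on version B (the rewrite author's own statement) =====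
-- stated objective: alternative
-- what changed: Replaces building a filtered set and comparison-sorting it descending with a single bounded-range scan from MAX_DIA down to MIN_DIA that appends each day present in a membership set and stops after MAX_AVISOS hits (counting-sort-like selection, no sort).
import Mathlib
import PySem

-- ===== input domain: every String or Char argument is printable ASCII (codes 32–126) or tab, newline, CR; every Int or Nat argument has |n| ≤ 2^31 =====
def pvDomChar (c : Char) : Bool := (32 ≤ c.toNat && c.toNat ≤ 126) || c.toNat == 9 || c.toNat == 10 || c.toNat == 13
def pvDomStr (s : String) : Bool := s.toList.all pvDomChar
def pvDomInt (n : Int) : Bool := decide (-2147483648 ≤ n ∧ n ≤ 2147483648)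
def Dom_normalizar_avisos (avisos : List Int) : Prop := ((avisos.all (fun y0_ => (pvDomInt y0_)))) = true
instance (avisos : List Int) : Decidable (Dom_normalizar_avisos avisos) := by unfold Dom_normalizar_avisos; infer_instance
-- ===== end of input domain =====

-- B replaces the filtered-set + descending sort with a bounded-range scan from 30 down to 5
-- stopping after 4 hits (alternative decomposition; return value only, no side effects).

-- ===== PORT A =====
-- `int(x)` on an int is the identity, so the list comprehension is a map of the identity
-- and the `except ValueError` branch is unreachable.
def normalizar_avisos (avisos : List Int) : List Int :=
  if avisos = [] then [30, 20, 10, 5]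
  else
    let avisos2 := avisos.map (fun x => x)
    let filtrados :=
      PySem.List.sorted
        (PySem.Set.ofList (avisos2.filter (fun d => decide (5 ≤ d) && decide (d ≤ 30))))
        (fun x => x) true
    if filtrados = [] then [30, 20, 10, 5]
    else PySem.List.slice filtrados none (some 4)

-- ===== PORT B =====
-- the `for d in range(30, 4, -1)` loop with an early break at len(res) == 4
def pvScan (vals : PySem.Set Int) : List Int → List Int → List Int
  | [], res => res
  | d :: rest, res =>
      if res.length = 4 then res
      else if PySem.Set.contains vals d then pvScan vals rest (res ++ [d])
      else pvScan vals rest res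

def normalizar_avisos_alt (avisos : List Int) : List Int :=
  if avisos = [] then [30, 20, 10, 5]
  else
    let vals := PySem.Set.ofList (avisos.map (fun x => x))
    let res := pvScan vals (PySem.List.pyRange 30 4 (-1)) []
    if res = [] then [30, 20, 10, 5]
    else res

-- ===== PRECONDITION & SPEC =====
def Spec_normalizar_avisos (avisos : List Int) (out : List Int) : Prop := out = normalizar_avisos_alt avisos
instance (avisos : List Int) (out : List Int) : Decidable (Spec_normalizar_avisos avisos out) := by unfold Spec_normalizar_avisos; infer_instance

-- ===== CLAIM (what is proved, stated in full; the proofs are below) =====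
def Claim_equal_normalizar_avisos : Prop := ∀ (avisos : List Int), Dom_normalizar_avisos avisos → Spec_normalizar_avisos avisos (normalizar_avisos avisos)

-- ===== LEMMAS AND PROOFS =====

-- the descending day range as a literal
def pvR : List Int := [30, 29, 28, 27, 26, 25, 24, 23, 22, 21, 20, 19, 18, 17, 16, 15, 14, 13, 12, 11, 10, 9, 8, 7, 6, 5]

theorem pvRange_eq : PySem.List.pyRange 30 4 (-1) = pvR := by decide

theorem pvR_mem (x : Int) : x ∈ pvR ↔ 5 ≤ x ∧ x ≤ 30 := by
  simp only [pvR, List.mem_cons, List.not_mem_nil, or_false]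
  omega

theorem pvR_pairwise : pvR.Pairwise (fun a b => b < a) := by decide

theorem pvR_nodup : pvR.Nodup := by decide

-- B's loop collects the first (4 - res.length) hits of the scan
theorem pvScan_eq (vals : PySem.Set Int) (l res : List Int) (h : res.length ≤ 4) :
    pvScan vals l res = res ++ (l.filter (fun d => PySem.Set.contains vals d)).take (4 - res.length) := by
  induction l generalizing res with
  | nil => simp [pvScan]
  | cons d rest ih =>
      by_cases h4 : res.length = 4
      · simp [pvScan, h4]
      · have hlt : res.length < 4 := lt_of_le_of_ne h h4
        by_cases hc : PySem.Set.contains vals d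
        · rw [pvScan, if_neg h4, if_pos hc, ih _ (by simp; omega),
            List.filter_cons_of_pos hc,
            show 4 - res.length = (4 - (res.length + 1)) + 1 from by omega,
            List.take_succ_cons]
          simp only [List.append_assoc, List.singleton_append, List.length_append,
            List.length_cons, List.length_nil]
        · rw [pvScan, if_neg h4, if_neg hc, ih _ h,
            List.filter_cons_of_neg (by simpa using hc)]

-- A's descending sort of the filtered set is exactly the filtered descending range
theorem pvSorted_eq (avisos : List Int) :
    PySem.List.sorted
        (PySem.Set.ofList (avisos.filter (fun d => decide (5 ≤ d) && decide (d ≤ 30))))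
        (fun x => x) true
      = pvR.filter (fun d => decide (d ∈ avisos)) := by
  apply PySem.List.sorted_rev_eq_of_perm_of_pairwise_gt
  · apply (List.perm_ext_iff_of_nodup (pvR_nodup.filter _)
      (PySem.Set.nodup_ofList _)).2
    intro x
    simp only [List.mem_filter, PySem.Set.mem_ofList, decide_eq_true_eq, Bool.and_eq_true,
      pvR_mem]
    tauto
  · exact List.Pairwise.filter _ pvR_pairwise

theorem pvContains_eq (avisos : List Int) (d : Int) :
    PySem.Set.contains (PySem.Set.ofList avisos) d = decide (d ∈ avisos) := by
  simp [PySem.Set.contains]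

-- ===== VERDICT (by name: the statement is the Claim_ definition above) =====
theorem normalizar_avisos_spec : Claim_equal_normalizar_avisos := by
  intro avisos _
  unfold Spec_normalizar_avisos normalizar_avisos normalizar_avisos_alt
  by_cases he : avisos = []
  · simp [he]
  · simp only [he, if_false, List.map_id_fun', id]
    rw [pvRange_eq, pvScan_eq _ _ _ (by simp), pvSorted_eq]
    have hfe : (pvR.filter (fun d => PySem.Set.contains (PySem.Set.ofList avisos) d))
        = pvR.filter (fun d => decide (d ∈ avisos)) := by
      apply List.filter_congr
      intro d _
      exact pvContains_eq avisos d
    rw [hfe]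
    simp only [List.nil_append, List.length_nil, Nat.sub_zero]
    by_cases hf : pvR.filter (fun d => decide (d ∈ avisos)) = []
    · simp [hf]
    · have ht : (pvR.filter (fun d => decide (d ∈ avisos))).take 4 ≠ [] := by
        simp [List.take_eq_nil_iff, hf]
      rw [if_neg hf, if_neg ht]
      simp [PySem.List.slice_to]
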